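-- pv_equiv track=rewrite | github.com/lengthwisehems/retail2 | warpweft_inventory.py | determine_color_simplified
-- ===== SOURCE A (Python) =====
-- from typing import Any, Dict, Iterable, List, Optional, Tuple
--
-- def determine_color_simplified(tags: Iterable[str], color_standardized: str = "") -> str:
--     lowered = [tag.lower() for tag in tags]
--     if any("wash:mid" in tag or "midwash" in tag for tag in lowered):
--         return "Medium"
--     if any(
--         "wash-black" == tag
--         or "wash:black" in tag
--         or "wash:dark" in tag
--         or "wash:otherdark" in tag
--         or "dark" == tag
--         for tag in lowered
--     ):
--         return "Dark"
--     if color_standardized and color_standardized.lower() == "black":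
--         return "Dark"
--     if any("wash:white" in tag or "wash:light" in tag or "wash:lightwash" in tag for tag in lowered):
--         return "Light"
--     if any("wash:other" in tag or "wash:neutrals" in tag for tag in lowered):
--         return "Other"
--     return ""
-- ===== SOURCE B (Python) =====
-- def determine_color_simplified(tags, color_standardized=""):
--     # One pass: lower each tag once, record which categories match, then apply the priority ladder.
--     medium = dark = light = other = False
--     for tag in tags:
--         t = tag.lower()
--         if "wash:mid" in t or "midwash" in t:
--             medium = True
--         if (t == "wash-black" or "wash:black" in t or "wash:dark" in t
--                 or "wash:otherdark" in t or t == "dark"):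
--             dark = True
--         if "wash:white" in t or "wash:light" in t or "wash:lightwash" in t:
--             light = True
--         if "wash:other" in t or "wash:neutrals" in t:
--             other = True
--     if medium:
--         return "Medium"
--     if dark or (color_standardized and color_standardized.lower() == "black"):
--         return "Dark"
--     if light:
--         return "Light"
--     if other:
--         return "Other"
--     return ""
-- ===== Notes on version B (the rewrite author's own statement) =====
-- stated objective: alternative
-- what changed: Replaces A's four separate any-scans over a precomputed lowered list with a single pass that lowers each tag once and sets four boolean category flags, followed by the priority ladder on the flags.
import Mathlib
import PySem

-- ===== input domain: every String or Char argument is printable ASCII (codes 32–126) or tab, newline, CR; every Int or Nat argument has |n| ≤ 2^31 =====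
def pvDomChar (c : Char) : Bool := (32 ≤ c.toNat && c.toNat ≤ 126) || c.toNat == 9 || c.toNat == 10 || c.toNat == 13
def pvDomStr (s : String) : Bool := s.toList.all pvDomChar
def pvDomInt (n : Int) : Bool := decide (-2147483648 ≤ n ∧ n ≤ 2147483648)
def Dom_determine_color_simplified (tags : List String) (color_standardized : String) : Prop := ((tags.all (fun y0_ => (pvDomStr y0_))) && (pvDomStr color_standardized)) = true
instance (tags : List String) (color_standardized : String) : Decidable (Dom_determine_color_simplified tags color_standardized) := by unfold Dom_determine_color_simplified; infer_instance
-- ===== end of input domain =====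

-- B is a single pass over the tags setting four boolean category flags, instead of A's
-- four any-scans over a precomputed lowered list; same cost, different decomposition.

-- ===== PORT A =====
def determine_color_simplified (tags : List String) (color_standardized : String) : String :=
  let lowered := tags.map (fun tag => PySem.Str.lower tag)
  if lowered.any (fun tag => PySem.Str.isIn "wash:mid" tag || PySem.Str.isIn "midwash" tag) then
    "Medium"
  else if lowered.any (fun tag =>
      tag == "wash-black" || PySem.Str.isIn "wash:black" tag || PySem.Str.isIn "wash:dark" tag ||
      PySem.Str.isIn "wash:otherdark" tag || tag == "dark") then
    "Dark"
  else if !(color_standardized == "") && PySem.Str.lower color_standardized == "black" then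
    "Dark"
  else if lowered.any (fun tag =>
      PySem.Str.isIn "wash:white" tag || PySem.Str.isIn "wash:light" tag ||
      PySem.Str.isIn "wash:lightwash" tag) then
    "Light"
  else if lowered.any (fun tag =>
      PySem.Str.isIn "wash:other" tag || PySem.Str.isIn "wash:neutrals" tag) then
    "Other"
  else
    ""

-- ===== PORT B =====
-- B-side per-category tests on an already-lowered tag
def pvMedTest (t : String) : Bool := PySem.Str.isIn "wash:mid" t || PySem.Str.isIn "midwash" t
def pvDarkTest (t : String) : Bool :=
  t == "wash-black" || PySem.Str.isIn "wash:black" t || PySem.Str.isIn "wash:dark" t ||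
  PySem.Str.isIn "wash:otherdark" t || t == "dark"
def pvLightTest (t : String) : Bool :=
  PySem.Str.isIn "wash:white" t || PySem.Str.isIn "wash:light" t || PySem.Str.isIn "wash:lightwash" t
def pvOtherTest (t : String) : Bool := PySem.Str.isIn "wash:other" t || PySem.Str.isIn "wash:neutrals" t

-- loop body of B's single pass: lower the tag once, OR each category test into its flag
def pvStep (st : Bool × Bool × Bool × Bool) (tag : String) : Bool × Bool × Bool × Bool :=
  let t := PySem.Str.lower tag
  (st.1 || pvMedTest t, st.2.1 || pvDarkTest t, st.2.2.1 || pvLightTest t, st.2.2.2 || pvOtherTest t)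

def determine_color_simplified_alt (tags : List String) (color_standardized : String) : String :=
  let flags := tags.foldl pvStep (false, false, false, false)
  if flags.1 then "Medium"
  else if flags.2.1 || (!(color_standardized == "") && PySem.Str.lower color_standardized == "black") then "Dark"
  else if flags.2.2.1 then "Light"
  else if flags.2.2.2 then "Other"
  else ""

-- ===== PRECONDITION & SPEC =====
def Spec_determine_color_simplified (tags : List String) (color_standardized : String) (out : String) : Prop := out = determine_color_simplified_alt tags color_standardized
instance (tags : List String) (color_standardized : String) (out : String) : Decidable (Spec_determine_color_simplified tags color_standardized out) := by unfold Spec_determine_color_simplified; infer_instance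

-- ===== CLAIM (what is proved, stated in full; the proofs are below) =====
def Claim_equal_determine_color_simplified : Prop := ∀ (tags : List String) (color_standardized : String), Dom_determine_color_simplified tags color_standardized → Spec_determine_color_simplified tags color_standardized (determine_color_simplified tags color_standardized)

-- ===== LEMMAS AND PROOFS =====

-- The one-pass fold computes, in each component, "initial flag OR some tag matches".
theorem pvFold_eq (tags : List String) : ∀ (m d l o : Bool),
    tags.foldl pvStep (m, d, l, o)
    = (m || tags.any (fun tag => pvMedTest (PySem.Str.lower tag)),
       d || tags.any (fun tag => pvDarkTest (PySem.Str.lower tag)),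
       l || tags.any (fun tag => pvLightTest (PySem.Str.lower tag)),
       o || tags.any (fun tag => pvOtherTest (PySem.Str.lower tag))) := by
  induction tags with
  | nil => intro m d l o; simp
  | cons hd tl ih =>
    intro m d l o
    simp only [List.foldl_cons, List.any_cons, ih, pvStep, Bool.or_assoc]

-- merging 'if c then x else if d then x else e' into one test
theorem pv_if_or_bool (c d : Bool) (x e : String) :
    (if c then x else if d then x else e) = (if c || d then x else e) := by
  cases c <;> cases d <;> simp

theorem determine_color_simplified_eq (tags : List String) (color_standardized : String) :
    determine_color_simplified tags color_standardized
    = determine_color_simplified_alt tags color_standardized := by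
  simp only [determine_color_simplified, determine_color_simplified_alt, pvFold_eq,
    Bool.false_or]
  simp only [pvMedTest, pvDarkTest, pvLightTest, pvOtherTest, List.any_map, Function.comp_def]
  rw [pv_if_or_bool]
  rfl

-- ===== VERDICT (by name: the statement is the Claim_ definition above) =====
theorem determine_color_simplified_spec : Claim_equal_determine_color_simplified := by
  intro tags cs _
  exact determine_color_simplified_eq tags cs
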